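-- pv_equiv track=rewrite | github.com/wehnsdaefflae/visual_experiments | src/fractal/fractal_n_dim.py | _get_cube_corners
-- ===== SOURCE A (Python) =====
-- import itertools
-- from typing import List, Tuple, Any, Optional, Iterable, Union, Set, Sequence, Generator
--
-- def _get_cube_corners(cube: Tuple[Tuple[int, ...], Tuple[int, ...]]) -> Set[Tuple[int, ...]]:
--     # (1, 4, 2), (6, 0, 3) ->
--     #   (1, 4, 2)
--     #   (1, 4, 3)
--     #   (1, 0, 2)
--     #   (1, 0, 3)
--     #   (6, 4, 2)
--     #   (6, 4, 3)
--     #   (6, 0, 2)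
--     #   (6, 0, 3)
--
--     # (5, 2), (4, 0) ->
--     #
--
--     dim, = set(len(_point) for _point in cube)
--     return set(
--         tuple(
--             cube[_i][_d]
--             for _d, _i in enumerate(_indices)
--         )
--         for _indices in itertools.product(*((0, 1) for _ in range(dim)))
--     )
--
--     return set(
--         tuple(
--             _corner[_d]
--             for _d in range(dim)
--         )
--         for _corner in itertools.product(cube, dim)
--     )
-- ===== SOURCE B (Python) =====
-- def _get_cube_corners(cube):
--     # Grow the corner set one dimension at a time: start from the single empty
--     # prefix and, for each coordinate d, extend every partial corner with the
--     # two endpoint values of that coordinate, deduplicating at every step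
--     # (so equal endpoints collapse immediately instead of at the end).
--     dim, = set(len(_point) for _point in cube)
--     corners = {()}
--     for _d in range(dim):
--         _lo, _hi = cube[0][_d], cube[1][_d]
--         corners = {_corner + (_value,) for _corner in corners for _value in (_lo, _hi)}
--     return corners
-- ===== Notes on version B (the rewrite author's own statement) =====
-- stated objective: alternative
-- what changed: Instead of enumerating all 2^dim index tuples with itertools.product and indexing into cube, B builds the corner set incrementally: a fold over the dimensions that extends each partial corner with the two endpoint values of that coordinate, deduplicating the partial set at every step (equal endpoints collapse early); the mismatched-length ValueError guard is kept.
import Mathlib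
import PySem

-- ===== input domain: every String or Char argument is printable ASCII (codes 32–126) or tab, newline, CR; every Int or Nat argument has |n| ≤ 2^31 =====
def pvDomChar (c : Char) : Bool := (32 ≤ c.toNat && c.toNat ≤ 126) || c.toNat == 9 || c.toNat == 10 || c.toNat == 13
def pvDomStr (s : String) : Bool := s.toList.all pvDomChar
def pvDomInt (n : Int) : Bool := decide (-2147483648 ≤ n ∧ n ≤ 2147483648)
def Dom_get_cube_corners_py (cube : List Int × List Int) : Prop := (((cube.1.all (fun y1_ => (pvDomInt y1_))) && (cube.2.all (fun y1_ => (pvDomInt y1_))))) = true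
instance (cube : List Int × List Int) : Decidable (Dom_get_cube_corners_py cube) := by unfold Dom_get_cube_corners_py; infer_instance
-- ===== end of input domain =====

-- B builds the corner set incrementally per dimension (with dedup at each step) instead of
-- enumerating itertools.product index tuples; equal RETURN value proved where the two point
-- lengths agree (A raises ValueError otherwise).

-- ===== PORT A =====
-- itertools.product(*((0, 1) for _ in range(dim))): last factor varies fastest
def pvProdIdx : Nat → List (List Nat)
  | 0 => [[]]
  | d + 1 => (pvProdIdx d).flatMap (fun t => [t ++ [0], t ++ [1]])

-- tuple(cube[_i][_d] for _d, _i in enumerate(_indices)); indices are always in range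
-- under Pre_ (both lengths = dim), so pyGetD's default is never used there.
def pvCornerA (cube : List Int × List Int) (indices : List Nat) : List Int :=
  (PySem.List.enumerate indices).map
    (fun p => PySem.List.pyGetD (if p.2 == 0 then cube.1 else cube.2) p.1 0)

def get_cube_corners_py (cube : List Int × List Int) : List (List Int) :=
  -- dim, = set(len(_point) for _point in cube): raises ValueError unless the set is a singleton
  match PySem.Set.ofList [cube.1.length, cube.2.length] with
  | [dim] => PySem.Set.ofList ((pvProdIdx dim).map (pvCornerA cube))
  | _ => []   -- ValueError in Python; excluded by Pre_

-- ===== PORT B =====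
-- corners = {_corner + (_value,) for _corner in corners for _value in (cube[0][_d], cube[1][_d])}
def pvStepB (cube : List Int × List Int) (corners : List (List Int)) (d : Nat) : List (List Int) :=
  PySem.Set.ofList (corners.flatMap
    (fun c => [c ++ [PySem.List.pyGetD cube.1 (d : Int) 0],
               c ++ [PySem.List.pyGetD cube.2 (d : Int) 0]]))

def get_cube_corners_py_alt (cube : List Int × List Int) : List (List Int) :=
  let dims := PySem.Set.ofList [cube.1.length, cube.2.length]
  if dims.length == 1 then
    (List.range (dims.headD 0)).foldl (pvStepB cube) [[]]
  else []   -- ValueError in Python; excluded by Pre_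

-- ===== PRECONDITION & SPEC =====
-- A raises ValueError ('too many values to unpack') when the two point tuples have different lengths.
def Pre_get_cube_corners_py (cube : List Int × List Int) : Prop :=
  cube.1.length = cube.2.length
instance (cube : List Int × List Int) : Decidable (Pre_get_cube_corners_py cube) := by
  unfold Pre_get_cube_corners_py; infer_instance

def pvWitness_get_cube_corners_py : (List Int × List Int) := ([1, 4, 2], [6, 0, 3])

def Spec_get_cube_corners_py (cube : List Int × List Int) (out : List (List Int)) : Prop := out = get_cube_corners_py_alt cube
instance (cube : List Int × List Int) (out : List (List Int)) : Decidable (Spec_get_cube_corners_py cube out) := by unfold Spec_get_cube_corners_py; infer_instance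

-- ===== CLAIM (what is proved, stated in full; the proofs are below) =====
def Claim_equal_get_cube_corners_py : Prop := ∀ (cube : List Int × List Int), Dom_get_cube_corners_py cube → Pre_get_cube_corners_py cube → Spec_get_cube_corners_py cube (get_cube_corners_py cube)

-- ===== LEMMAS AND PROOFS =====

-- every index tuple produced at depth d has length d
theorem pvProdIdx_length {d : Nat} {t : List Nat} (h : t ∈ pvProdIdx d) : t.length = d := by
  induction d generalizing t with
  | zero => simp [pvProdIdx] at h; simp [h]
  | succ k ih =>
    simp only [pvProdIdx, List.mem_flatMap] at h
    obtain ⟨s, hs, ht⟩ := h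
    have hl := ih hs
    simp only [List.mem_cons, List.not_mem_nil, or_false] at ht
    rcases ht with rfl | rfl <;> simp [hl]

-- extending the index tuple by one bit appends the corresponding coordinate
theorem pvCornerA_append (cube : List Int × List Int) (t : List Nat) (b : Nat) :
    pvCornerA cube (t ++ [b]) =
      pvCornerA cube t ++
        [PySem.List.pyGetD (if b == 0 then cube.1 else cube.2) (t.length : Int) 0] := by
  unfold pvCornerA
  rw [PySem.List.enumerate_append, List.map_append]
  simp [PySem.List.enumerate_cons, PySem.List.enumerate_nil]

-- s.update(xs) = s when xs contributes nothing new
theorem pvUpdate_of_subset {α : Type} [BEq α] [LawfulBEq α] (s : PySem.Set α) (xs : List α)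
    (h : ∀ y ∈ xs, y ∈ s) : PySem.Set.update s xs = s := by
  rw [PySem.Set.update_eq_append_filter]
  have hnil : (PySem.Set.ofList xs).filter (fun y => !(PySem.Set.contains s y)) = [] := by
    rw [List.filter_eq_nil_iff]
    intro y hy
    have hys : y ∈ s := h y ((PySem.Set.mem_ofList _ _).mp hy)
    simp
    exact hys
  rw [hnil, List.append_nil]

-- deduplicating before a flatMap does not change the deduplicated result
theorem pvOfList_flatMap_ofList {α β : Type} [BEq α] [LawfulBEq α] [BEq β] [LawfulBEq β]
    (M : List α) (f : α → List β) :
    PySem.Set.ofList ((PySem.Set.ofList M).flatMap f) = PySem.Set.ofList (M.flatMap f) := by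
  induction M using List.reverseRecOn with
  | nil => rfl
  | append_singleton M x ih =>
    rw [PySem.Set.ofList_append_singleton]
    by_cases hx : x ∈ PySem.Set.ofList M
    · rw [PySem.Set.add_of_mem hx, ih, List.flatMap_append, PySem.Set.ofList_append]
      symm
      refine pvUpdate_of_subset _ _ (fun y hy => ?_)
      simp only [List.flatMap_cons, List.flatMap_nil, List.append_nil] at hy
      exact (PySem.Set.mem_ofList _ _).mpr
        (List.mem_flatMap.mpr ⟨x, (PySem.Set.mem_ofList _ _).mp hx, hy⟩)
    · rw [PySem.Set.add_of_not_mem hx, List.flatMap_append, PySem.Set.ofList_append, ih,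
        List.flatMap_append, PySem.Set.ofList_append]

-- loop invariant: after d steps B holds exactly A's deduped corners of depth d
theorem pvFoldB (cube : List Int × List Int) (d : Nat) :
    (List.range d).foldl (pvStepB cube) [[]] =
      PySem.Set.ofList ((pvProdIdx d).map (pvCornerA cube)) := by
  induction d with
  | zero => rfl
  | succ k ih =>
    rw [List.range_succ, List.foldl_append, List.foldl_cons, List.foldl_nil, ih]
    unfold pvStepB
    rw [pvOfList_flatMap_ofList, List.flatMap_map]
    congr 1
    show _ = ((pvProdIdx k).flatMap (fun t => [t ++ [0], t ++ [1]])).map (pvCornerA cube)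
    rw [List.map_flatMap]
    refine List.flatMap_congr (fun t ht => ?_)
    have hlen := pvProdIdx_length ht
    simp only [List.map_cons, List.map_nil, pvCornerA_append, hlen]
    norm_num

theorem get_cube_corners_py_spec : Claim_equal_get_cube_corners_py := by
  intro cube _ hpre
  unfold Spec_get_cube_corners_py get_cube_corners_py get_cube_corners_py_alt
  unfold Pre_get_cube_corners_py at hpre
  have hset : PySem.Set.ofList [cube.1.length, cube.2.length] = [cube.1.length] := by
    have h1 : PySem.Set.ofList [cube.1.length] = [cube.1.length] :=
      by simp [PySem.Set.ofList_eq_self_of_nodup]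
    rw [← hpre, show ([cube.1.length, cube.1.length] : List Nat) = [cube.1.length] ++ [cube.1.length] from rfl,
       PySem.Set.ofList_append_singleton, h1, PySem.Set.add_of_mem (List.mem_singleton_self _)]
  rw [hset]
  simp only [List.length_cons, List.length_nil, List.headD_cons, beq_self_eq_true, if_pos]
  exact (pvFoldB cube cube.1.length).symm
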